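-- pv_equiv track=rewrite | github.com/paras-a/Data-Structures-and-Algorithms | recursion.py | product_even
-- ===== SOURCE A (Python) =====
-- def product_even(n):
--     """
--     Calculate the product of even numbers from 1 to n using recursion.
--
--     @param n: A positive integer
--     @return: The product of even numbers from 1 to n
--     @rtype: int
--
--     Examples:
--         >>> product_even(6)
--         48
--         >>> product_even(3)
--         2
--     """
--     if n <= 0:
--         raise ValueError("n must be a positive integer")
--     if n == 1:
--         return n
--     product = 1
--     if n % 2 == 0:
--         product *= n
--     return product * product_even(n-1)
-- ===== SOURCE B (Python) =====
-- def product_even(n):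
--     if n <= 0:
--         raise ValueError("n must be a positive integer")
--     result = 1
--     for i in range(2, n + 1, 2):
--         result *= i
--     return result
-- ===== Notes on version B (the rewrite author's own statement) =====
-- stated objective: faster
-- what changed: Replaces the full 1..n recursion (which multiplies only the even values it meets) with a single iterative pass over range(2, n+1, 2), accumulating the product.
import Mathlib
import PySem

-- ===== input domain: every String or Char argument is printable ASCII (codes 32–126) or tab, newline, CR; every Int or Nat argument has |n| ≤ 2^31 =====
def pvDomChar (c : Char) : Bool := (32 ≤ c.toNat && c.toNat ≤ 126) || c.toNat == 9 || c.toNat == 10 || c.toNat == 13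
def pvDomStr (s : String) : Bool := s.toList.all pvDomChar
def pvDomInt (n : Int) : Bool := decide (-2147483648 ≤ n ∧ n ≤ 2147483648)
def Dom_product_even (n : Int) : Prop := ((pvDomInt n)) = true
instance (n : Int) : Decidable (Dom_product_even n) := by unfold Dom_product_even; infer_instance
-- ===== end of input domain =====

-- B replaces A's full 1..n recursion with one iterative pass over range(2, n+1, 2); A raises ValueError for n <= 0 (excluded by Pre_).


-- ===== PORT A =====
def product_even (n : Int) : Int :=
  if _h0 : n ≤ 0 then 0          -- unreachable under Pre_: Python raises ValueError here
  else if _h1 : n = 1 then n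
  else (if n % 2 = 0 then n else 1) * product_even (n - 1)
termination_by n.toNat
decreasing_by omega

-- ===== PORT B =====
def product_even_alt (n : Int) : Int :=
  (PySem.List.pyRange 2 (n + 1) 2).foldl (fun result i => result * i) 1

-- ===== PRECONDITION & SPEC =====
-- Pre_ excludes exactly n ≤ 0, where the Python A raises ValueError.
def Pre_product_even (n : Int) : Prop := 1 ≤ n
instance (n : Int) : Decidable (Pre_product_even n) := by unfold Pre_product_even; infer_instance
def pvWitness_product_even : Int := 6

def Spec_product_even (n : Int) (out : Int) : Prop := out = product_even_alt n
instance (n : Int) (out : Int) : Decidable (Spec_product_even n out) := by unfold Spec_product_even; infer_instance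

-- ===== CLAIM (what is proved, stated in full; the proofs are below) =====
def Claim_equal_product_even : Prop := ∀ (n : Int), Dom_product_even n → Pre_product_even n → Spec_product_even n (product_even n)

-- ===== LEMMAS AND PROOFS =====

-- range(2, n+2, 2) extends range(2, n+1, 2) by n+1 exactly when n+1 is even
lemma pyRange_even_snoc (n : Int) (hn : 1 ≤ n) :
    PySem.List.pyRange 2 (n + 2) 2 =
      PySem.List.pyRange 2 (n + 1) 2 ++ (if (n + 1) % 2 = 0 then [n + 1] else []) := by
  rw [PySem.List.pyRange_of_pos 2 (n + 2) (by norm_num),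
      PySem.List.pyRange_of_pos 2 (n + 1) (by norm_num)]
  have h2 : (if (2:Int) < n + 2 then ((n + 2 - 2 + 2 - 1) / 2).toNat else 0) = ((n + 1) / 2).toNat := by
    rw [if_pos (by omega)]; omega
  have h1 : (if (2:Int) < n + 1 then ((n + 1 - 2 + 2 - 1) / 2).toNat else 0) = (n / 2).toNat := by
    split_ifs with h
    · congr 1; omega
    · omega
  rw [h1, h2]
  by_cases he : (n + 1) % 2 = 0
  · rw [if_pos he]
    have hm : ((n + 1) / 2).toNat = (n / 2).toNat + 1 := by omega
    rw [hm, List.range_succ, List.map_append]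
    congr 1
    simp only [List.map_cons, List.map_nil]
    congr 1
    omega
  · rw [if_neg he, List.append_nil]
    congr 2
    omega

lemma product_even_eq_alt (n : Int) (hn : 1 ≤ n) : product_even n = product_even_alt n := by
  induction n, hn using Int.le_induction with
  | base =>
    unfold product_even product_even_alt
    decide
  | succ n hn ih =>
    have hA : product_even (n + 1) = (if (n + 1) % 2 = 0 then n + 1 else 1) * product_even n := by
      rw [product_even]
      rw [dif_neg (by omega), dif_neg (by omega)]
      norm_num
    rw [hA, ih]
    unfold product_even_alt
    have : n + 1 + 1 = n + 2 := by ring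
    rw [this, pyRange_even_snoc n hn, List.foldl_append]
    by_cases he : (n + 1) % 2 = 0
    · rw [if_pos he, if_pos he]
      simp [List.foldl]
      ring
    · rw [if_neg he, if_neg he]
      simp [List.foldl]

-- ===== VERDICT (by name: the statement is the Claim_ definition above) =====
theorem product_even_spec : Claim_equal_product_even := by
  intro n _ hpre
  exact product_even_eq_alt n hpre
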